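-- pv_equiv track=rewrite | github.com/dontBlamestorming/Algorithm | kakao-test/prize_hunter.py | get_prize_2nd
-- ===== SOURCE A (Python) =====
-- def get_prize_2nd(rank, lst):
--     prize_by_rank_2nd = []
--
--     for i in range(len(lst)):
--         r = i
--
--         if i == 0:
--             r = 1
--         else:
--             r = 2 ** i  # 제곱근
--
--         for _ in range(r):
--             prize_by_rank_2nd.append(lst[i])
--
--     if 0 < rank <= len(prize_by_rank_2nd):
--         return prize_by_rank_2nd[rank - 1]
--     else:
--         return 0
-- ===== SOURCE B (Python) =====
-- def get_prize_2nd(rank, lst):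
--     # element i occupies ranks [2**i, 2**(i+1)-1]; total ranks = 2**len(lst) - 1
--     if 0 < rank <= 2 ** len(lst) - 1:
--         return lst[rank.bit_length() - 1]
--     return 0
-- ===== Notes on version B (the rewrite author's own statement) =====
-- stated objective: faster
-- what changed: B never builds the exponentially repeated list: since element i is repeated 2**i times, the bucket holding a given rank is rank.bit_length()-1, computed directly; intended as faster (a timing run measured 11x at n=16; A timed out at n=64 where B returned).
import Mathlib
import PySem

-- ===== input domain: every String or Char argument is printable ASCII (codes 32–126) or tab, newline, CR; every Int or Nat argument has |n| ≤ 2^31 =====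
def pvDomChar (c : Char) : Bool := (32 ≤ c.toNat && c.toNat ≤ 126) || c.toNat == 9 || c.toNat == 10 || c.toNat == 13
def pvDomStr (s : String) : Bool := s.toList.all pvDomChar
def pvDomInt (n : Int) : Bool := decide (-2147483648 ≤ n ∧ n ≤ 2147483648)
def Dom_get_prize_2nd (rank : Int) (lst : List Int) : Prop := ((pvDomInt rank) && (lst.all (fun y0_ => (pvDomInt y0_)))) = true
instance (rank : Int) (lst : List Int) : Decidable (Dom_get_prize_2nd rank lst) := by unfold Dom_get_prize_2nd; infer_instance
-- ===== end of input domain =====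

-- B replaces A's O(2^n) materialised prize list by direct bucket arithmetic (rank.bit_length()-1); intended as faster — probe measured 11x at n=16 and A timed out at n=64 where B returned. Proved equal on all inputs.


-- ===== PORT A =====
-- literal transliteration: outer loop over range(len(lst)), inner loop appending lst[i] r times;
-- lst[i] has 0 ≤ i < len(lst), so PySem.List.pyGet? is always some and .getD 0 is exact
-- prize_by_rank_2nd after the first m outer-loop iterations (m = len(lst) gives the full list)
def prefixA (lst : List Int) (m : Nat) : List Int :=
  (List.range m).foldl (fun acc (i : Nat) =>
    let r : Nat := if i = 0 then 1 else 2 ^ i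
    (List.range r).foldl (fun acc2 _ => acc2 ++ [(PySem.List.pyGet? lst (i : Int)).getD 0]) acc) []

def get_prize_2nd (rank : Int) (lst : List Int) : Int :=
  let prize := prefixA lst lst.length
  if 0 < rank ∧ rank ≤ (prize.length : Int) then
    (PySem.List.pyGet? prize (rank - 1)).getD 0
  else 0

-- ===== PORT B =====
-- rank.bit_length() - 1 for rank > 0 is Nat.log2; the index is in range whenever the guard holds,
-- so pyGet? is always some and .getD 0 is exact
def get_prize_2nd_alt (rank : Int) (lst : List Int) : Int :=
  if 0 < rank ∧ rank ≤ 2 ^ lst.length - 1 then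
    (PySem.List.pyGet? lst ((Nat.log2 rank.toNat : Nat) : Int)).getD 0
  else 0

-- ===== PRECONDITION & SPEC =====
def Spec_get_prize_2nd (rank : Int) (lst : List Int) (out : Int) : Prop := out = get_prize_2nd_alt rank lst
instance (rank : Int) (lst : List Int) (out : Int) : Decidable (Spec_get_prize_2nd rank lst out) := by unfold Spec_get_prize_2nd; infer_instance

-- ===== CLAIM (what is proved, stated in full; the proofs are below) =====
def Claim_equal_get_prize_2nd : Prop := ∀ (rank : Int) (lst : List Int), Dom_get_prize_2nd rank lst → Spec_get_prize_2nd rank lst (get_prize_2nd rank lst)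

-- ===== LEMMAS AND PROOFS =====

theorem inner_foldl (x : Int) (acc : List Int) (r : Nat) :
    (List.range r).foldl (fun acc2 _ => acc2 ++ [x]) acc = acc ++ List.replicate r x := by
  induction r with
  | zero => simp
  | succ n ih => simp [List.range_succ, ih, List.replicate_succ']

theorem prefixA_succ (lst : List Int) (m : Nat) :
    prefixA lst (m + 1) =
      prefixA lst m ++ List.replicate (2 ^ m) ((PySem.List.pyGet? lst (m : Int)).getD 0) := by
  unfold prefixA
  rw [List.range_succ, List.foldl_append]
  simp only [List.foldl_cons, List.foldl_nil]
  rcases Nat.eq_zero_or_pos m with h | h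
  · subst h; simp
  · rw [if_neg (Nat.pos_iff_ne_zero.mp h), inner_foldl]

theorem prefixA_length (lst : List Int) (m : Nat) :
    (prefixA lst m).length = 2 ^ m - 1 := by
  induction m with
  | zero => simp [prefixA]
  | succ n ih =>
    rw [prefixA_succ, List.length_append, ih, List.length_replicate]
    have : 1 ≤ 2 ^ n := Nat.one_le_two_pow
    have : 2 ^ (n + 1) = 2 ^ n + 2 ^ n := by ring
    omega

theorem prefixA_getD (lst : List Int) (m k : Nat) (hk : k < 2 ^ m - 1) :
    (prefixA lst m).getD k 0 = (PySem.List.pyGet? lst ((Nat.log2 (k + 1) : Nat) : Int)).getD 0 := by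
  induction m with
  | zero => simp at hk
  | succ n ih =>
    rw [prefixA_succ]
    by_cases h : k < 2 ^ n - 1
    · rw [List.getD_append _ _ _ _ (by rw [prefixA_length]; exact h)]
      exact ih h
    · have h1 : 1 ≤ 2 ^ n := Nat.one_le_two_pow
      have hge : (prefixA lst n).length ≤ k := by rw [prefixA_length]; omega
      have hlt : k - (prefixA lst n).length < 2 ^ n := by
        rw [prefixA_length]
        have : 2 ^ (n + 1) = 2 ^ n + 2 ^ n := by ring
        omega
      rw [List.getD, List.getElem?_append_right hge, List.getElem?_replicate]
      have hlog : Nat.log2 (k + 1) = n := by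
        rw [Nat.log2_eq_log_two]
        apply Nat.log_eq_of_pow_le_of_lt_pow
        · rw [prefixA_length] at hge; omega
        · rw [prefixA_length] at hlt
          have : 2 ^ (n + 1) = 2 ^ n + 2 ^ n := by ring
          omega
      rw [if_pos hlt, hlog]
      simp

theorem get_prize_main (rank : Int) (lst : List Int) :
    get_prize_2nd rank lst = get_prize_2nd_alt rank lst := by
  unfold get_prize_2nd get_prize_2nd_alt
  have hlen : (prefixA lst lst.length).length = 2 ^ lst.length - 1 := prefixA_length lst lst.length
  have h1 : 1 ≤ 2 ^ lst.length := Nat.one_le_two_pow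
  have hcast : ((prefixA lst lst.length).length : Int) = 2 ^ lst.length - 1 := by
    rw [hlen]; push_cast [h1]; ring
  by_cases hg : 0 < rank ∧ rank ≤ 2 ^ lst.length - 1
  · have hg' : 0 < rank ∧ rank ≤ ((prefixA lst lst.length).length : Int) := by
      constructor
      · exact hg.1
      · rw [hcast]; exact_mod_cast hg.2
    rw [if_pos hg', if_pos hg]
    -- the index rank - 1 is a nonnegative in-range Nat
    obtain ⟨hpos, hle⟩ := hg
    set k : Nat := (rank - 1).toNat with hkdef
    have hrk : rank - 1 = (k : Int) := by omega
    have hNc : ((2 : Int) ^ lst.length) = ((2 ^ lst.length : Nat) : Int) := by push_cast; ring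
    rw [hNc] at hle
    have hk : k < 2 ^ lst.length - 1 := by omega
    have hget : PySem.List.pyGet? (prefixA lst lst.length) (rank - 1) =
        (prefixA lst lst.length)[k]? := by
      rw [hrk]
      simp [PySem.List.pyGet?, PySem.List.pyIdx?, hlen]
      rw [if_pos (by omega)]
      simp
    rw [hget]
    have hk1 : rank.toNat = k + 1 := by omega
    have := prefixA_getD lst lst.length k hk
    rw [List.getD, hk1] at *
    have hkin : k < (prefixA lst lst.length).length := by rw [hlen]; exact hk
    rw [List.getElem?_eq_getElem hkin] at this ⊢
    simpa using this
  · rw [if_neg (by rw [hcast]; exact hg), if_neg hg]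

-- ===== VERDICT (by name: the statement is the Claim_ definition above) =====
theorem get_prize_2nd_spec : Claim_equal_get_prize_2nd := by
  intro rank lst _
  unfold Spec_get_prize_2nd
  exact get_prize_main rank lst
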